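-- pv_equiv track=rewrite | github.com/GarpikeS/SkillBox | Python Basics Part 2/Module_3_(Methods for working with lists)/task_9.py | max_people_with_skates
-- ===== SOURCE A (Python) =====
-- def max_people_with_skates(skates_sizes, people_sizes):
--     skates_sizes.sort()
--     people_sizes.sort()
--     count = 0
--     i = j = 0
--     while i < len(skates_sizes) and j < len(people_sizes):
--         if skates_sizes[i] == people_sizes[j]:
--             count += 1
--             i += 1
--             j += 1
--         elif skates_sizes[i] < people_sizes[j]:
--             i += 1
--         else:
--             j += 1
--     return count
-- ===== SOURCE B (Python) =====
-- def max_people_with_skates(skates_sizes, people_sizes):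
--     # keep A's in-place sorts so the observable mutation of both arguments is identical
--     skates_sizes.sort()
--     people_sizes.sort()
--     skate_counts = {}
--     for x in skates_sizes:
--         skate_counts[x] = skate_counts.get(x, 0) + 1
--     people_counts = {}
--     for x in people_sizes:
--         people_counts[x] = people_counts.get(x, 0) + 1
--     return sum(min(n, people_counts.get(x, 0)) for x, n in skate_counts.items())
-- ===== Notes on version B (the rewrite author's own statement) =====
-- stated objective: alternative
-- what changed: Replaces the two-pointer merge over the sorted lists by frequency tables: build a count dict per list and sum, for each distinct skate size, the minimum of its two counts.
import Mathlib
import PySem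

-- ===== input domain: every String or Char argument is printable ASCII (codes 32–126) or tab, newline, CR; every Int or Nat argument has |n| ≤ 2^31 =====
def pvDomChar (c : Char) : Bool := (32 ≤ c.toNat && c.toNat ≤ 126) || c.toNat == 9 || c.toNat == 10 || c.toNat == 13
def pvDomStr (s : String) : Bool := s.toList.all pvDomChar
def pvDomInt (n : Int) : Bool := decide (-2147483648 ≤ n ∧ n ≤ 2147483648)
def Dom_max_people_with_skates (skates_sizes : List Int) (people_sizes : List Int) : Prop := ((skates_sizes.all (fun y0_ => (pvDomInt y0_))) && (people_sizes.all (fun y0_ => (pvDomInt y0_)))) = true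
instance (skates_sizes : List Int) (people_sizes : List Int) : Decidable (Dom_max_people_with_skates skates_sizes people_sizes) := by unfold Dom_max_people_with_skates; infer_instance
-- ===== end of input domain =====

-- B replaces A's sorted two-pointer merge by a per-distinct-size sum of minimum occurrence
-- counts (an alternative frequency formulation; both keep the in-place sorts, so the
-- observable mutation of the arguments is the same — the claim is about the return value).


-- ===== PORT A =====
-- the while-loop: the two index pointers are represented by the remaining suffixes,
-- `count` is the accumulator
def pvMergeLoop : Int → List Int → List Int → Int
  | count, [], _ => count
  | count, _ :: _, [] => count
  | count, x :: xs, y :: ys =>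
      if x = y then pvMergeLoop (count + 1) xs ys
      else if x < y then pvMergeLoop count xs (y :: ys)
      else pvMergeLoop count (x :: xs) ys
termination_by _ xs ys => xs.length + ys.length

def max_people_with_skates (skates_sizes : List Int) (people_sizes : List Int) : Int :=
  let skates := PySem.List.sorted skates_sizes (fun x => x) false
  let people := PySem.List.sorted people_sizes (fun x => x) false
  pvMergeLoop 0 skates people

-- ===== PORT B =====
-- the two 'd[x] = d.get(x, 0) + 1' loops, then the sum over skate_counts.items()
def max_people_with_skates_alt (skates_sizes : List Int) (people_sizes : List Int) : Int :=
  let skates := PySem.List.sorted skates_sizes (fun x => x) false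
  let people := PySem.List.sorted people_sizes (fun x => x) false
  let skate_counts := skates.foldl (fun d x => d.insert x (d.getD x 0 + 1)) PySem.Dict.empty
  let people_counts := people.foldl (fun d x => d.insert x (d.getD x 0 + 1)) PySem.Dict.empty
  (skate_counts.items.map (fun kv => min kv.2 (people_counts.getD kv.1 0))).sum

-- ===== PRECONDITION & SPEC =====
def Spec_max_people_with_skates (skates_sizes : List Int) (people_sizes : List Int) (out : Int) : Prop := out = max_people_with_skates_alt skates_sizes people_sizes
instance (skates_sizes : List Int) (people_sizes : List Int) (out : Int) : Decidable (Spec_max_people_with_skates skates_sizes people_sizes out) := by unfold Spec_max_people_with_skates; infer_instance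

-- ===== CLAIM (what is proved, stated in full; the proofs are below) =====
def Claim_equal_max_people_with_skates : Prop := ∀ (skates_sizes : List Int) (people_sizes : List Int), Dom_max_people_with_skates skates_sizes people_sizes → Spec_max_people_with_skates skates_sizes people_sizes (max_people_with_skates skates_sizes people_sizes)

-- ===== LEMMAS AND PROOFS =====

-- the merge over two ≤-sorted lists counts the cardinality of the multiset intersection
theorem pvMergeLoop_eq (c : Int) (sa sb : List Int)
    (ha : sa.Pairwise (· ≤ ·)) (hb : sb.Pairwise (· ≤ ·)) :
    pvMergeLoop c sa sb = c + (((sa : Multiset Int) ∩ (sb : Multiset Int)).card : Int) := by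
  fun_induction pvMergeLoop c sa sb with
  | case1 c ys => simp
  | case2 c x xs => simp
  | case3 c xs x ys ih =>
    rw [ih ha.tail hb.tail]
    simp only [← Multiset.cons_coe]
    rw [Multiset.cons_inter_of_pos _ (Multiset.mem_cons_self x _), Multiset.erase_cons_head]
    simp; ring
  | case4 c x xs y ys hxy hlt ih =>
    rw [ih ha.tail hb]
    simp only [← Multiset.cons_coe]
    have hx : x ∉ (y ::ₘ (ys : Multiset Int)) := by
      intro hmem
      rcases Multiset.mem_cons.mp hmem with h | h
      · omega
      · have := (List.pairwise_cons.mp hb).1 x (Multiset.mem_coe.mp h); omega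
    rw [Multiset.cons_inter_of_neg _ hx]
  | case5 c x xs y ys hxy hlt ih =>
    rw [ih ha hb.tail]
    simp only [← Multiset.cons_coe]
    have hy : y ∉ (x ::ₘ (xs : Multiset Int)) := by
      intro hmem
      rcases Multiset.mem_cons.mp hmem with h | h
      · omega
      · have := (List.pairwise_cons.mp ha).1 y (Multiset.mem_coe.mp h); omega
    rw [Multiset.inter_comm (x ::ₘ (xs : Multiset Int)) (y ::ₘ (ys : Multiset Int)),
      Multiset.cons_inter_of_neg _ hy,
      Multiset.inter_comm (x ::ₘ (xs : Multiset Int)) (ys : Multiset Int)]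

-- B's per-distinct-element sum of min counts is the same multiset-intersection cardinality
theorem pvSumMin_eq (sa sb : List Int) :
    ((PySem.Set.ofList sa).map
      (fun k => min ((List.count k sa : Int)) ((List.count k sb : Int)))).sum
    = (((sa : Multiset Int) ∩ (sb : Multiset Int)).card : Int) := by
  have hset : ((PySem.Set.ofList sa : List Int).toFinset)
      = ((sa : Multiset Int).toFinset) := by
    ext x; simp [PySem.Set.mem_ofList]
  rw [← List.sum_toFinset _ (PySem.Set.nodup_ofList sa), hset]
  have hterm : ∀ x ∈ (sa : Multiset Int).toFinset,
      min ((List.count x sa : Int)) ((List.count x sb : Int))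
      = (Multiset.count x (((sa : Multiset Int) ∩ (sb : Multiset Int))) : Int) := by
    intro x _
    rw [Multiset.count_inter]
    simp [Nat.cast_min]
  rw [Finset.sum_congr rfl hterm]
  have hsub : (((sa : Multiset Int) ∩ (sb : Multiset Int)).toFinset) ⊆ (sa : Multiset Int).toFinset := by
    intro x hx
    rw [Multiset.mem_toFinset] at hx ⊢
    exact Multiset.mem_of_le Multiset.inter_le_left hx
  rw [← Finset.sum_subset hsub (fun x _ hx => by
    have h0 : Multiset.count x (((sa : Multiset Int) ∩ (sb : Multiset Int))) = 0 :=
      Multiset.count_eq_zero.mpr (fun hm => hx (Multiset.mem_toFinset.mpr hm))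
    exact_mod_cast h0)]
  rw [← Nat.cast_sum, Multiset.toFinset_sum_count_eq]

-- ===== VERDICT (by name: the statement is the Claim_ definition above) =====
theorem max_people_with_skates_spec : Claim_equal_max_people_with_skates := by
  intro a b _
  unfold Spec_max_people_with_skates max_people_with_skates max_people_with_skates_alt
  rw [pvMergeLoop_eq 0 _ _ (PySem.List.sorted_pairwise a (fun x => x))
    (PySem.List.sorted_pairwise b (fun x => x))]
  dsimp only
  rw [PySem.Dict.foldl_insert_getD_add_one_eq_counter, PySem.Dict.foldl_insert_getD_add_one_eq_counter,
    PySem.Dict.items_counter, List.map_map]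
  simp only [Function.comp_def, PySem.Dict.getD_counter]
  rw [pvSumMin_eq]
  ring
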